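-- pv_equiv track=rewrite | github.com/VisionF1/visionf1-backend | visionf1/ml/strategy_predictor.py | _windows_to_stints
-- ===== SOURCE A (Python) =====
-- from typing import List, Tuple, Literal, Dict
--
-- def _windows_to_stints(template: List[str], windows: List[Tuple[int, int, int]], total_laps: int) -> List[Tuple[str, int, int]]:
--     n = len(template)
--     if n == 0: return []
--     if n == 1: return [(template[0], 1, total_laps + 1)]
--
--     if not windows or len(windows) < (n - 1):
--         return []
--
--     cuts = [1] + [int(max(2, min(total_laps - 1, round(lo)))) for (lo, _mid, _hi) in windows[: n - 1]] + [total_laps + 1]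
--
--     for i in range(1, len(cuts)):
--         if cuts[i] <= cuts[i - 1]:
--             cuts[i] = cuts[i - 1] + 1
--     cuts[-1] = max(cuts[-1], cuts[-2] + 1)
--
--     stints = []
--     for i in range(n):
--         start, end = cuts[i], cuts[i + 1]
--         if end <= start:
--             return []
--         stints.append((template[i], start, end))
--     return stints
-- ===== SOURCE B (Python) =====
-- def _windows_to_stints(template, windows, total_laps):
--     # Closed-form boundaries: cut(i) = max_{j<=i}(raw(j) + i - j) instead of
--     # building a cuts array and normalizing it in place.
--     n = len(template)
--     if n == 0:
--         return []
--     if n == 1: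
--         return [(template[0], 1, total_laps + 1)]
--     if len(windows) < n - 1:
--         return []
--
--     def raw(j):
--         if j == 0:
--             return 1
--         if j == n:
--             return total_laps + 1
--         return int(max(2, min(total_laps - 1, round(windows[j - 1][0]))))
--
--     def cut(i):
--         return max(raw(j) + (i - j) for j in range(i + 1))
--
--     return [(template[i], cut(i), cut(i + 1)) for i in range(n)]
-- ===== Notes on version B (the rewrite author's own statement) =====
-- stated objective: alternative
-- what changed: Replaces the build-cuts-array / in-place-normalize / pairing-pass pipeline with a direct closed form: every stint boundary is computed independently as max_{j<=i}(raw_j + i - j), so no mutable cuts array, no normalization recurrence and no early-return pairing loop exist.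
import Mathlib
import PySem

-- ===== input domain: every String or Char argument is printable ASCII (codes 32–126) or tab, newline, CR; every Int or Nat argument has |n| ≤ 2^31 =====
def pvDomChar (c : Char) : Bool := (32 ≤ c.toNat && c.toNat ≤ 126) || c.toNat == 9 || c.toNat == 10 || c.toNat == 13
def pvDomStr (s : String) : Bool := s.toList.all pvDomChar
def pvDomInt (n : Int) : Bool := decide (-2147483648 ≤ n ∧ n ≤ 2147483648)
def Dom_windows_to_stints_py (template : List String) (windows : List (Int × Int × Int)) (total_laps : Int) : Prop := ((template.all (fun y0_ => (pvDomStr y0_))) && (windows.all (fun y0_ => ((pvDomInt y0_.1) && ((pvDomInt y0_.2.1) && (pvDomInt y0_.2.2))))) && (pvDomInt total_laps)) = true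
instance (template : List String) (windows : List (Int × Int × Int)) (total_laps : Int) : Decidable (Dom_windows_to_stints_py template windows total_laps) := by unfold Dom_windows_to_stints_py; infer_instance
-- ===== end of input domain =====

-- B replaces A's mutable cuts array + in-place normalization + pairing pass by a closed
-- form computing each stint boundary independently as max_{j≤i}(raw_j + i − j)
-- (objective: alternative algorithm; return value proved equal everywhere).

-- ===== PORT A =====
-- the in-place normalization loop 'for i in range(1, len(cuts)): if cuts[i] <= cuts[i-1]: cuts[i] = cuts[i-1]+1',
-- ported as a recursion carrying the previous (already updated) element
def pvGoNorm (prev : Int) : List Int → List Int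
  | [] => []
  | c :: cs =>
      let c' := if c ≤ prev then prev + 1 else c
      c' :: pvGoNorm c' cs

-- 'cuts[-1] = max(cuts[-1], cuts[-2] + 1)'
def pvAdjLast : List Int → List Int
  | [a, b] => [a, max b (a + 1)]
  | a :: b :: c :: rest => a :: pvAdjLast (b :: c :: rest)
  | l => l

-- the final pairing loop: start = cuts[i], end = cuts[i+1]; an 'end <= start' early 'return []' becomes none
def pvBuildA : List String → Int → List Int → Option (List (String × Int × Int))
  | [], _, _ => some []
  | t :: ts, start, e :: rest =>
      if e ≤ start then none
      else (pvBuildA ts e rest).map (fun l => (t, start, e) :: l)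
  | _ :: _, _, [] => none   -- cuts exhausted before template (unreachable: cuts has length n+1)

def windows_to_stints_py (template : List String) (windows : List (Int × Int × Int)) (total_laps : Int) : List (String × Int × Int) :=
  let n := template.length
  if n = 0 then []
  else if n = 1 then [(template.headD "", 1, total_laps + 1)]
  else if windows.isEmpty || decide (windows.length < n - 1) then []
  else
    -- round(lo) on an int is lo; int(...) on an int is identity
    let cuts0 : List Int :=
      (1 : Int) :: (((windows.take (n - 1)).map (fun w => max 2 (min (total_laps - 1) w.1))) ++ [total_laps + 1])
    let cuts1 : List Int :=
      match cuts0 with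
      | [] => []
      | c :: cs => c :: pvGoNorm c cs
    let cuts2 := pvAdjLast cuts1
    match cuts2 with
    | [] => []
    | c0 :: rest => (pvBuildA template c0 rest).getD []

-- ===== PORT B =====
-- raw(j) of Source B (windows[j-1] is in range under the length guard, so getD's default is never used)
def pvRaw (windows : List (Int × Int × Int)) (total_laps : Int) (n : Nat) (j : Nat) : Int :=
  if j = 0 then 1
  else if j = n then total_laps + 1
  else max 2 (min (total_laps - 1) (windows.getD (j - 1) (0, 0, 0)).1)

-- cut(i) of Source B: Python's max over the nonempty generator (range(i+1) is nonempty, so getD 0 is never used)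
def pvCut (windows : List (Int × Int × Int)) (total_laps : Int) (n : Nat) (i : Nat) : Int :=
  (PySem.List.max? ((List.range (i + 1)).map
      (fun j => pvRaw windows total_laps n j + ((i : Int) - (j : Int)))) (fun y => y)).getD 0

def windows_to_stints_py_alt (template : List String) (windows : List (Int × Int × Int)) (total_laps : Int) : List (String × Int × Int) :=
  let n := template.length
  if n = 0 then []
  else if n = 1 then [(template.headD "", 1, total_laps + 1)]
  else if windows.length < n - 1 then []
  else (List.range n).map (fun i =>
    (template.getD i "", pvCut windows total_laps n i, pvCut windows total_laps n (i + 1)))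

-- ===== PRECONDITION & SPEC =====
def Spec_windows_to_stints_py (template : List String) (windows : List (Int × Int × Int)) (total_laps : Int) (out : List (String × Int × Int)) : Prop := out = windows_to_stints_py_alt template windows total_laps
instance (template : List String) (windows : List (Int × Int × Int)) (total_laps : Int) (out : List (String × Int × Int)) : Decidable (Spec_windows_to_stints_py template windows total_laps out) := by unfold Spec_windows_to_stints_py; infer_instance

-- ===== CLAIM (what is proved, stated in full; the proofs are below) =====
def Claim_equal_windows_to_stints_py : Prop := ∀ (template : List String) (windows : List (Int × Int × Int)) (total_laps : Int), Dom_windows_to_stints_py template windows total_laps → Spec_windows_to_stints_py template windows total_laps (windows_to_stints_py template windows total_laps)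

-- ===== LEMMAS AND PROOFS =====

-- proof-only intermediate: the streaming recurrence both pipelines satisfy
def pvAltLoop (total_laps : Int) : List String → List (Int × Int × Int) → Int → List (String × Int × Int)
  | [t], _, prev => [(t, prev, max (total_laps + 1) (prev + 1))]
  | t :: ts, w :: ws, prev =>
      let raw := max 2 (min (total_laps - 1) w.1)
      let actual := max raw (prev + 1)
      (t, prev, actual) :: pvAltLoop total_laps ts ws actual
  | _, _, _ => []

-- tail of pvAdjLast past the (kept) head
def pvAdj2 (p : Int) : List Int → List Int
  | [] => []
  | [x] => [max x (p + 1)]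
  | x :: y :: rest => x :: pvAdj2 x (y :: rest)

theorem pvAdjLast_cons (p : Int) (l : List Int) : pvAdjLast (p :: l) = p :: pvAdj2 p l := by
  induction l generalizing p with
  | nil => simp [pvAdjLast, pvAdj2]
  | cons x xs ih =>
      cases xs with
      | nil => simp [pvAdjLast, pvAdj2]
      | cons y ys => simp [pvAdjLast, pvAdj2, ih]

theorem pvGoNorm_ne_nil (p : Int) (l : List Int) (h : l ≠ []) : pvGoNorm p l ≠ [] := by
  cases l with
  | nil => exact absurd rfl h
  | cons c cs => simp [pvGoNorm]

-- A's pipeline equals the streaming recurrence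
theorem pvKey (total_laps : Int) (ts : List String) (ws : List (Int × Int × Int)) (prev : Int)
    (hne : ts ≠ []) (hlen : ts.length - 1 ≤ ws.length) :
    pvBuildA ts prev (pvAdj2 prev (pvGoNorm prev
        (((ws.take (ts.length - 1)).map (fun w => max 2 (min (total_laps - 1) w.1))) ++ [total_laps + 1])))
      = some (pvAltLoop total_laps ts ws prev) := by
  induction ts generalizing ws prev with
  | nil => exact absurd rfl hne
  | cons t ts ih =>
      cases ts with
      | nil =>
          simp only [List.length, List.take, List.map, List.nil_append, pvGoNorm, pvAdj2]
          have hmax : (if total_laps + 1 ≤ prev then prev + 1 else total_laps + 1)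
              = max (total_laps + 1) (prev + 1) := by
            split <;> omega
          have h2 : max (if total_laps + 1 ≤ prev then prev + 1 else total_laps + 1) (prev + 1)
              = max (total_laps + 1) (prev + 1) := by split <;> omega
          rw [h2]
          simp only [pvBuildA, pvAltLoop]
          rw [if_neg (by omega)]
          rfl
      | cons t2 ts2 =>
          cases ws with
          | nil => simp at hlen
          | cons w ws =>
              have hlen' : (t2 :: ts2).length - 1 ≤ ws.length := by
                simp at hlen ⊢; omega
              have htake : ((w :: ws).take ((t :: t2 :: ts2).length - 1))
                  = w :: ws.take ((t2 :: ts2).length - 1) := by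
                simp [List.length]
              rw [htake]
              simp only [List.map_cons, List.cons_append, pvGoNorm]
              set c' := if max 2 (min (total_laps - 1) w.1) ≤ prev then prev + 1
                        else max 2 (min (total_laps - 1) w.1) with hc'
              have hc'eq : c' = max (max 2 (min (total_laps - 1) w.1)) (prev + 1) := by
                rw [hc']; split <;> omega
              have hgne : pvGoNorm c'
                  (((ws.take ((t2 :: ts2).length - 1)).map (fun w => max 2 (min (total_laps - 1) w.1))) ++ [total_laps + 1]) ≠ [] :=
                pvGoNorm_ne_nil _ _ (by simp)
              rw [show ∀ (l : List Int), l ≠ [] → pvAdj2 prev (c' :: l) = c' :: pvAdj2 c' l from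
                    fun l hl => by cases l with
                      | nil => exact absurd rfl hl
                      | cons a as => rfl]
              · simp only [pvBuildA]
                rw [if_neg (by omega)]
                rw [ih ws c' (by simp) hlen']
                simp only [Option.map_some, pvAltLoop]
                rw [hc'eq]
              · exact hgne

theorem pvGuard_eq (windows : List (Int × Int × Int)) (n : Nat) (hn : 2 ≤ n) :
    (windows.isEmpty || decide (windows.length < n - 1)) = decide (windows.length < n - 1) := by
  cases windows with
  | nil => simp; omega
  | cons w ws => simp

-- pvCut satisfies the streaming recurrence
theorem pvFoldlMaxShift (l : List Int) (a : Int) :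
    (l.map (· + 1)).foldl max (a + 1) = l.foldl max a + 1 := by
  induction l generalizing a with
  | nil => simp
  | cons x xs ih =>
      simp only [List.map_cons, List.foldl_cons]
      rw [max_add_add_right]
      exact ih _

theorem pvCut_eq_foldl (windows : List (Int × Int × Int)) (total_laps : Int) (n : Nat) (i : Nat) :
    pvCut windows total_laps n i
      = ((List.range i).map
          (fun j => pvRaw windows total_laps n (j + 1) + ((i : Int) - ((j : Int) + 1)))).foldl
          max (1 + (i : Int)) := by
  unfold pvCut
  rw [List.range_succ_eq_map, List.map_cons, PySem.List.max?_id_cons, Option.getD_some]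
  simp only [List.map_map]
  have h0 : pvRaw windows total_laps n 0 + ((i : Int) - (0 : Nat)) = 1 + i := by
    simp [pvRaw]
  rw [h0]
  congr 1

theorem pvCut_succ (windows : List (Int × Int × Int)) (total_laps : Int) (n : Nat) (i : Nat) :
    pvCut windows total_laps n (i + 1)
      = max (pvRaw windows total_laps n (i + 1)) (pvCut windows total_laps n i + 1) := by
  rw [pvCut_eq_foldl, pvCut_eq_foldl]
  rw [List.range_succ, List.map_append, List.foldl_append]
  simp only [List.map_cons, List.map_nil, List.foldl_cons, List.foldl_nil]
  have hshift : (List.range i).map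
        (fun j => pvRaw windows total_laps n (j + 1) + (((i : Int) + 1) - ((j : Int) + 1)))
      = ((List.range i).map
          (fun j => pvRaw windows total_laps n (j + 1) + ((i : Int) - ((j : Int) + 1)))).map (· + 1) := by
    rw [List.map_map]
    apply List.map_congr_left
    intro j _
    simp only [Function.comp]
    ring
  have hlast : pvRaw windows total_laps n (i + 1) + (((i : Int) + 1) - (((i : Nat) : Int) + 1))
      = pvRaw windows total_laps n (i + 1) := by ring
  push_cast
  rw [hshift, hlast, show (1 : Int) + ((i : Int) + 1) = (1 + (i : Int)) + 1 by ring,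
      pvFoldlMaxShift]
  exact max_comm _ _

theorem pvCut_zero (windows : List (Int × Int × Int)) (total_laps : Int) (n : Nat) :
    pvCut windows total_laps n 0 = 1 := by
  simp [pvCut, List.range_one, pvRaw, PySem.List.max?, List.foldl]

-- the streaming recurrence equals B's closed-form comprehension
theorem pvStream (template : List String) (windows : List (Int × Int × Int)) (total_laps : Int)
    (n : Nat) (hn : n = template.length) (hw : n - 1 ≤ windows.length) (h2 : 2 ≤ n) :
    ∀ m i, i + m = n → 0 < m →
    pvAltLoop total_laps (template.drop i) (windows.drop i) (pvCut windows total_laps n i)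
      = (List.range' i m).map (fun k =>
          (template.getD k "", pvCut windows total_laps n k, pvCut windows total_laps n (k + 1))) := by
  intro m
  induction m with
  | zero => intro i _ h; omega
  | succ m ih =>
      intro i hi _
      have hiT : i < template.length := by omega
      have hdT : template.drop i = template[i] :: template.drop (i + 1) :=
        List.drop_eq_getElem_cons hiT
      have hgD : template.getD i "" = template[i] := List.getD_eq_getElem _ _ hiT
      cases m with
      | zero =>
          have hdT1 : template.drop (i + 1) = [] := List.drop_of_length_le (by omega)
          have hraw : pvRaw windows total_laps n (i + 1) = total_laps + 1 := by
            unfold pvRaw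
            rw [if_neg (by omega), if_pos (by omega)]
          rw [hdT, hdT1]
          simp only [pvAltLoop, List.range', List.map_cons, List.map_nil]
          rw [hgD, pvCut_succ, hraw]
      | succ m =>
          have hiW : i < windows.length := by omega
          have hdW : windows.drop i = windows[i] :: windows.drop (i + 1) :=
            List.drop_eq_getElem_cons hiW
          have hdT1 : template.drop (i + 1) = template[i + 1] :: template.drop (i + 2) :=
            List.drop_eq_getElem_cons (by omega)
          have hraw : pvRaw windows total_laps n (i + 1)
              = max 2 (min (total_laps - 1) windows[i].1) := by
            unfold pvRaw
            rw [if_neg (by omega), if_neg (by omega)]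
            simp [List.getD, List.getElem?_eq_getElem hiW]
          rw [hdT, hdT1, hdW]
          simp only [pvAltLoop]
          have hact : max (max 2 (min (total_laps - 1) windows[i].1))
                (pvCut windows total_laps n i + 1) = pvCut windows total_laps n (i + 1) := by
            rw [pvCut_succ, hraw]
          rw [hact, ← hdT1, ih (i + 1) (by omega) (by omega)]
          simp only [List.range'_succ, List.map_cons]
          rw [hgD]

-- ===== VERDICT (by name: the statement is the Claim_ definition above) =====
theorem windows_to_stints_py_spec : Claim_equal_windows_to_stints_py := by
  intro template windows total_laps _
  unfold Spec_windows_to_stints_py windows_to_stints_py windows_to_stints_py_alt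
  by_cases h0 : template.length = 0
  · simp [h0]
  by_cases h1 : template.length = 1
  · simp [h1]
  have hn : 2 ≤ template.length := by omega
  simp only [if_neg h0, if_neg h1]
  rw [pvGuard_eq windows template.length hn]
  by_cases hg : windows.length < template.length - 1
  · simp [hg]
  · simp only [decide_eq_true_eq] at *
    rw [if_neg hg, if_neg hg]
    have hne : template ≠ [] := by cases template <;> simp_all
    have hkey := pvKey total_laps template windows 1 hne (by omega)
    simp only [pvAdjLast_cons]
    rw [hkey]
    have hs := pvStream template windows total_laps template.length rfl (by omega) hn
        template.length 0 (by omega) (by omega)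
    simp only [List.drop_zero] at hs
    rw [pvCut_zero] at hs
    rw [Option.getD_some, hs, List.range_eq_range']
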